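-- pv_equiv track=rewrite | github.com/abhishekbhamore/Python-Everyday | python_de_practice/day03/test.py | categorize_amounts
-- ===== SOURCE A (Python) =====
-- def categorize_amounts(transactions):
--     """Categorize by amount"""
--
--     categories = {"small": 0, "medium": 0, "large": 0}
--
--     for trans in transactions:
--         amount = trans["amount"]
--         if amount < 100:
--             categories["small"] += 1
--         elif amount < 500:
--             categories["medium"] += 1
--         else:
--             categories["large"] += 1
--
--     return categories
-- ===== SOURCE B (Python) =====
-- def categorize_amounts(transactions):
--     """Categorize by amount"""
--     amounts = [trans["amount"] for trans in transactions]
--     below100 = sum(1 for a in amounts if a < 100)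
--     below500 = sum(1 for a in amounts if a < 500)
--     return {
--         "small": below100,
--         "medium": below500 - below100,
--         "large": len(amounts) - below500,
--     }
-- ===== Notes on version B (the rewrite author's own statement) =====
-- stated objective: alternative
-- what changed: Replaces the per-element if/elif classification loop by cumulative threshold counting: count amounts below 100 and below 500 over the whole list, then derive the three bucket sizes by subtraction, so no element is ever assigned a bucket.
import Mathlib
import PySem

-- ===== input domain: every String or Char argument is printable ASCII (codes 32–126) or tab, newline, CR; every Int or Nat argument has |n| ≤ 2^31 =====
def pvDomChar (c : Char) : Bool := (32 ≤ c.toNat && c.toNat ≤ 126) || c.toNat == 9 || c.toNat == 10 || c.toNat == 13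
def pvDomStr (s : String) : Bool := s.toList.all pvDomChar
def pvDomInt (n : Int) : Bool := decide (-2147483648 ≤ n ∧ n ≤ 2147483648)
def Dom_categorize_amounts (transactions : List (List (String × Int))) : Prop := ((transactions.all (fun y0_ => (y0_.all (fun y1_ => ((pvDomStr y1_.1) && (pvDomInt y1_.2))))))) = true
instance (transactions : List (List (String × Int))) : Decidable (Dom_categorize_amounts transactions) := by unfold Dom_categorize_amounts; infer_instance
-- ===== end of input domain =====

-- B drops A's per-element classification loop for cumulative threshold counts with subtraction (alternative structure, same cost).

-- ===== PORT A =====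
-- one loop step of A: dict['amount'] lookup (KeyError excluded by Pre_, default never used inside Pre_), then the if/elif chain
def categorize_amounts_step (cat : PySem.Dict String Int) (trans : List (String × Int)) : PySem.Dict String Int :=
  let amount := (PySem.Dict.mk trans).getD "amount" 0
  if amount < 100 then cat.modify "small" 0 (· + 1)
  else if amount < 500 then cat.modify "medium" 0 (· + 1)
  else cat.modify "large" 0 (· + 1)

def categorize_amounts (transactions : List (List (String × Int))) : List (String × Int) :=
  (transactions.foldl categorize_amounts_step
    (PySem.Dict.ofList [("small", 0), ("medium", 0), ("large", 0)])).items

-- ===== PORT B =====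
-- Source B: extract the amounts, count those below each threshold, derive the buckets by subtraction
def categorize_amounts_alt (transactions : List (List (String × Int))) : List (String × Int) :=
  let amounts := transactions.map (fun trans => (PySem.Dict.mk trans).getD "amount" 0)
  let below100 : Int := (amounts.countP (fun a => a < 100) : Nat)
  let below500 : Int := (amounts.countP (fun a => a < 500) : Nat)
  [("small", below100), ("medium", below500 - below100), ("large", (amounts.length : Int) - below500)]

-- ===== PRECONDITION & SPEC =====
-- Pre_ excludes exactly the transactions without an "amount" key, where Python A raises KeyError.
def Pre_categorize_amounts (transactions : List (List (String × Int))) : Prop :=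
  (transactions.all (fun t => t.any (fun p => p.1 == "amount"))) = true
instance (transactions : List (List (String × Int))) : Decidable (Pre_categorize_amounts transactions) := by unfold Pre_categorize_amounts; infer_instance
def pvWitness_categorize_amounts : (List (List (String × Int))) := [[("amount", 50)], [("amount", 500)]]

def Spec_categorize_amounts (transactions : List (List (String × Int))) (out : List (String × Int)) : Prop := out = categorize_amounts_alt transactions
instance (transactions : List (List (String × Int))) (out : List (String × Int)) : Decidable (Spec_categorize_amounts transactions out) := by unfold Spec_categorize_amounts; infer_instance

-- ===== CLAIM =====
def Claim_equal_categorize_amounts : Prop := ∀ (transactions : List (List (String × Int))), Dom_categorize_amounts transactions → Pre_categorize_amounts transactions → Spec_categorize_amounts transactions (categorize_amounts transactions)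

-- ===== LEMMAS AND PROOFS =====
-- invariant: A's dict state is always the three fixed keys, each carrying its start value plus the matching threshold-difference count
lemma categorize_loop_eq (ts : List (List (String × Int))) : ∀ (s m l : Int),
    (ts.foldl categorize_amounts_step (PySem.Dict.mk [("small", s), ("medium", m), ("large", l)])).items
      = (let amounts := ts.map (fun trans => (PySem.Dict.mk trans).getD "amount" 0)
         let c1 : Int := (amounts.countP (fun a => a < 100) : Nat)
         let c2 : Int := (amounts.countP (fun a => a < 500) : Nat)
         [("small", s + c1), ("medium", m + (c2 - c1)), ("large", l + ((amounts.length : Int) - c2))]) := by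
  induction ts with
  | nil => intro s m l; simp
  | cons t ts ih =>
    intro s m l
    simp only [List.foldl_cons]
    by_cases h1 : (PySem.Dict.mk t).getD "amount" 0 < 100
    · have hA : categorize_amounts_step (PySem.Dict.mk [("small", s), ("medium", m), ("large", l)]) t
          = PySem.Dict.mk [("small", s + 1), ("medium", m), ("large", l)] := by
        simp only [categorize_amounts_step]
        rw [if_pos h1]
        simp [PySem.Dict.modify, PySem.Dict.insert, PySem.Dict.getD, PySem.Dict.get?]
      rw [hA, ih]
      have h2 : (PySem.Dict.mk t).getD "amount" 0 < 500 := by omega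
      simp only [List.map_cons, List.countP_cons, h1, h2, decide_true, List.length_cons]
      refine congrArg₂ _ (by push_cast; ring_nf) (congrArg₂ _ (by push_cast; ring_nf) (congrArg₂ _ (by push_cast; ring_nf) rfl))
    · by_cases h2 : (PySem.Dict.mk t).getD "amount" 0 < 500
      · have hA : categorize_amounts_step (PySem.Dict.mk [("small", s), ("medium", m), ("large", l)]) t
            = PySem.Dict.mk [("small", s), ("medium", m + 1), ("large", l)] := by
          simp only [categorize_amounts_step]
          rw [if_neg h1, if_pos h2]
          simp [PySem.Dict.modify, PySem.Dict.insert, PySem.Dict.getD, PySem.Dict.get?]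
        rw [hA, ih]
        simp only [List.map_cons, List.countP_cons, h1, h2, decide_true, decide_false, List.length_cons]
        refine congrArg₂ _ (by push_cast; ring_nf) (congrArg₂ _ (by push_cast; ring_nf) (congrArg₂ _ (by push_cast; ring_nf) rfl))
      · have hA : categorize_amounts_step (PySem.Dict.mk [("small", s), ("medium", m), ("large", l)]) t
            = PySem.Dict.mk [("small", s), ("medium", m), ("large", l + 1)] := by
          simp only [categorize_amounts_step]
          rw [if_neg h1, if_neg h2]
          simp [PySem.Dict.modify, PySem.Dict.insert, PySem.Dict.getD, PySem.Dict.get?]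
        rw [hA, ih]
        simp only [List.map_cons, List.countP_cons, h1, h2, decide_false, List.length_cons]
        refine congrArg₂ _ (by push_cast; ring_nf) (congrArg₂ _ (by push_cast; ring_nf) (congrArg₂ _ (by push_cast; ring_nf) rfl))

lemma categorize_ofList_eq :
    PySem.Dict.ofList [("small", (0 : Int)), ("medium", 0), ("large", 0)]
      = PySem.Dict.mk [("small", 0), ("medium", 0), ("large", 0)] := by decide

-- ===== VERDICT =====
theorem categorize_amounts_spec : Claim_equal_categorize_amounts := by
  intro ts _ _
  unfold Spec_categorize_amounts categorize_amounts categorize_amounts_alt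
  rw [categorize_ofList_eq, categorize_loop_eq]
  simp
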